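-- pv_equiv track=rewrite | github.com/Matias-Gutierrez/practica-con-python | clase 2 semestre/clase 4/grafico.py | datos_casos
-- ===== SOURCE A (Python) =====
-- def datos_casos(x,y):
--     x1 = []
--     y1 = []
--     mes = x[0]
--     # 2020-03-03
--     # 0123456
--
--     x1.append(mes[0:7])
--     fecha_mes = 0
--     suma_casos = 0
--     for fecha in range(len(x)):
--
--
--         if x[fecha].startswith(x1[fecha_mes]):
--             suma_casos += y[fecha]
--         else:
--             y1.append(suma_casos)
--             suma_casos=y[fecha]
--             fecha_mes+=1
--             mes = x[fecha]
--             x1.append(mes[0:7])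
--
--     y1.append(suma_casos)
--
--     return x1, y1
-- ===== SOURCE B (Python) =====
-- def _run_end(key, pairs, i):
--     # index just past the run of consecutive dates (from i on) that start with key
--     while i < len(pairs) and pairs[i][0].startswith(key):
--         i += 1
--     return i
--
--
-- def datos_casos(x, y):
--     # Outer loop over month-runs: peel off one maximal run at a time and sum it,
--     # instead of a flat element-indexed pass with a running accumulator.
--     months, totals = [], []
--     pairs = list(zip(x, y))
--     i = 0
--     while i < len(pairs):
--         d, v = pairs[i]
--         key = d[:7]
--         j = _run_end(key, pairs, i + 1)
--         months.append(key)
--         totals.append(v + sum(w for _, w in pairs[i + 1:j]))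
--         i = j
--     return months, totals
-- ===== Notes on version B (the rewrite author's own statement) =====
-- stated objective: alternative
-- what changed: B is a nested run-extraction: an outer loop peels off one maximal month-run at a time with a prefix-scan helper and sums each run separately, instead of A's flat element-indexed pass that threads a running accumulator and a month counter across all elements.
-- outside the precondition, e.g. on datos_casos([], []): A raises IndexError, B returns ([], []); on datos_casos(['2020-03-01', '2020-03-02'], [1]): A raises IndexError, B returns (['2020-03'], [1])
import Mathlib
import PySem

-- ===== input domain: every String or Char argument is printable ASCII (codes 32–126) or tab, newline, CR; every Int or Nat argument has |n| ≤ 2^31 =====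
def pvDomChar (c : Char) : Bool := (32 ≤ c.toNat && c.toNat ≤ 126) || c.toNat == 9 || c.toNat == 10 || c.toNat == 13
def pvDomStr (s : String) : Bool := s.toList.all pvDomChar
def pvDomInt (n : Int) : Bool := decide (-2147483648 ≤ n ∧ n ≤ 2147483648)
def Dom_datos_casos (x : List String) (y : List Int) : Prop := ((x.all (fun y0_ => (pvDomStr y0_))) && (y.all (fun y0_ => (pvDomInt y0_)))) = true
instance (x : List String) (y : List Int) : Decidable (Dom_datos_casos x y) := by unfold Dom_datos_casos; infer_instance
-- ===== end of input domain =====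

-- B replaces A's flat index loop (running accumulator + month counter) by an outer loop
-- over maximal month-runs, peeling off one run at a time and summing it (objective: alternative).
-- Equivalence is about the return value; neither version mutates its arguments.

-- ===== PORT A =====
def datos_casos (x : List String) (y : List Int) : List String × List Int :=
  let mes := PySem.List.pyGetD x 0 ""          -- x[0]; Pre_ excludes the empty list, on which Python raises IndexError
  let x1 : List String := [PySem.Str.slice mes (some 0) (some 7)]
  let st := (List.range x.length).foldl
    (fun (s : List String × List Int × Nat × Int) (fecha : Nat) =>
      let x1 := s.1; let y1 := s.2.1; let fecha_mes := s.2.2.1; let suma_casos := s.2.2.2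
      if PySem.Str.startswith (PySem.List.pyGetD x (fecha : Int) "")
           (PySem.List.pyGetD x1 (fecha_mes : Int) "") then
        (x1, y1, fecha_mes, suma_casos + PySem.List.pyGetD y (fecha : Int) 0)
      else
        (x1 ++ [PySem.Str.slice (PySem.List.pyGetD x (fecha : Int) "") (some 0) (some 7)],
         y1 ++ [suma_casos], fecha_mes + 1, PySem.List.pyGetD y (fecha : Int) 0))
    (x1, ([] : List Int), 0, 0)
  (st.1, st.2.1 ++ [st.2.2.2])

-- ===== PORT B =====
-- _split_run: the inner while loop is the span of 'date starts with key' over pairs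
def splitRun (key : String) : List (String × Int) → List (String × Int) × List (String × Int)
  | [] => ([], [])
  | p :: rest =>
    if PySem.Str.startswith p.1 key then
      let ab := splitRun key rest
      (p :: ab.1, ab.2)
    else ([], p :: rest)

theorem splitRun_snd_length_le (key : String) :
    ∀ (l : List (String × Int)), (splitRun key l).2.length ≤ l.length := by
  intro l
  induction l with
  | nil => simp [splitRun]
  | cons p rest ih =>
    simp only [splitRun]
    split_ifs
    · exact Nat.le_succ_of_le ih
    · simp

-- sum(w for _, w in run)
def sumRun (l : List (String × Int)) : Int := l.foldl (fun a p => a + p.2) 0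

-- the outer while loop over the remaining (date, value) pairs
def bLoop : List (String × Int) → List String × List Int
  | [] => ([], [])
  | (d, v) :: rest =>
    let key := PySem.Str.slice d (some 0) (some 7)
    let rr := splitRun key rest
    let mt := bLoop rr.2
    (key :: mt.1, (v + sumRun rr.1) :: mt.2)
termination_by l => l.length
decreasing_by
  exact Nat.lt_succ_of_le (splitRun_snd_length_le _ rest)

def datos_casos_alt (x : List String) (y : List Int) : List String × List Int :=
  bLoop (x.zip y)

-- ===== PRECONDITION & SPEC =====
-- A raises IndexError on x = [] (x[0]) and whenever y is shorter than x (y[fecha]); Pre_ excludes exactly those.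
def Pre_datos_casos (x : List String) (y : List Int) : Prop := x ≠ [] ∧ x.length ≤ y.length
instance (x : List String) (y : List Int) : Decidable (Pre_datos_casos x y) := by unfold Pre_datos_casos; infer_instance
def pvWitness_datos_casos : List String × List Int :=
  (["2020-03-01", "2020-03-02", "2020-04-01"], [1, 2, 3])
def Spec_datos_casos (x : List String) (y : List Int) (out : List String × List Int) : Prop := out = datos_casos_alt x y
instance (x : List String) (y : List Int) (out : List String × List Int) : Decidable (Spec_datos_casos x y out) := by unfold Spec_datos_casos; infer_instance

-- ===== CLAIM (what is proved, stated in full; the proofs are below) =====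
def Claim_equal_datos_casos : Prop := ∀ (x : List String) (y : List Int), Dom_datos_casos x y → Pre_datos_casos x y → Spec_datos_casos x y (datos_casos x y)

-- ===== LEMMAS AND PROOFS =====

-- A's loop body, once its x[fecha]/y[fecha] lookups are materialised as the pair (d, v).
def aStep (s : List String × List Int × Nat × Int) (d : String) (v : Int) :
    List String × List Int × Nat × Int :=
  if PySem.Str.startswith d (PySem.List.pyGetD s.1 ((s.2.2.1 : Nat) : Int) "") then
    (s.1, s.2.1, s.2.2.1, s.2.2.2 + v)
  else
    (s.1 ++ [PySem.Str.slice d (some 0) (some 7)], s.2.1 ++ [s.2.2.2], s.2.2.1 + 1, v)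

-- B's run step with the run starter already consumed: key k, accumulated value t, rest l
def bCont (k : String) (t : Int) (l : List (String × Int)) : List String × List Int :=
  let rr := splitRun k l
  let mt := bLoop rr.2
  (k :: mt.1, (t + sumRun rr.1) :: mt.2)

-- turning 'for fecha in range(len(x))' with x[fecha]/y[fecha] lookups into a walk over zip x y
theorem foldl_range_pyGetD_eq_zip {σ : Type} (g : σ → String → Int → σ) :
    ∀ (x : List String) (y : List Int), x.length ≤ y.length → ∀ (init : σ),
      (List.range x.length).foldl
          (fun s (i : Nat) => g s (PySem.List.pyGetD x ((i : Nat) : Int) "") (PySem.List.pyGetD y ((i : Nat) : Int) 0)) init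
        = (x.zip y).foldl (fun s p => g s p.1 p.2) init := by
  intro x
  induction x with
  | nil => intro y _ init; simp
  | cons a x ih =>
    intro y hy init
    cases y with
    | nil => simp at hy
    | cons b y =>
      simp only [PySem.List.pyGetD_natCast, List.length_cons, List.range_succ_eq_map,
        List.foldl_cons, List.foldl_map, List.getD_cons_succ, List.getD_cons_zero,
        List.zip_cons_cons]
      have := ih y (by simpa using hy) (g init a b)
      simp only [PySem.List.pyGetD_natCast] at this
      exact this

theorem startswith_slice7 (l : List Char) :
    PySem.Chars.startswith l (PySem.List.slice l none (some 7)) = true := by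
  rw [PySem.List.slice_to l (by norm_num), PySem.Chars.startswith_iff]
  exact List.take_prefix _ _

theorem getD_append_length {α : Type} (as : List α) (k d : α) :
    (as ++ [k]).getD as.length d = k := by
  simp [List.getD]

theorem sumRun_shift : ∀ (l : List (String × Int)) (c : Int),
    l.foldl (fun a p => a + p.2) c = c + sumRun l := by
  intro l
  induction l with
  | nil => intro c; simp [sumRun]
  | cons p l ih =>
    intro c
    simp only [sumRun, List.foldl_cons] at *
    rw [ih (c + p.2), ih (0 + p.2)]
    ring

theorem sumRun_cons (p : String × Int) (l : List (String × Int)) :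
    sumRun (p :: l) = p.2 + sumRun l := by
  simp only [sumRun, List.foldl_cons]
  rw [sumRun_shift l (0 + p.2)]
  simp [sumRun]

theorem bLoop_cons (d : String) (v : Int) (rest : List (String × Int)) :
    bLoop ((d, v) :: rest) = bCont (PySem.Str.slice d (some 0) (some 7)) v rest := by
  rw [bLoop, bCont]

-- main invariant: A's state (xs0 ++ [k], ts0, xs0.length, t) with the tail l still to process
-- corresponds to B continuing the current run with key k and accumulator t.
theorem inv_lemma :
    ∀ (l : List (String × Int)) (xs0 : List String) (ts0 : List Int) (k : String) (t : Int),
      ((l.foldl (fun s p => aStep s p.1 p.2) (xs0 ++ [k], ts0, xs0.length, t)).1,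
       (l.foldl (fun s p => aStep s p.1 p.2) (xs0 ++ [k], ts0, xs0.length, t)).2.1
         ++ [(l.foldl (fun s p => aStep s p.1 p.2) (xs0 ++ [k], ts0, xs0.length, t)).2.2.2])
        = (xs0 ++ (bCont k t l).1, ts0 ++ (bCont k t l).2) := by
  intro l
  induction l with
  | nil =>
    intro xs0 ts0 k t
    simp [bCont, splitRun, bLoop, sumRun]
  | cons p l ih =>
    intro xs0 ts0 k t
    simp only [List.foldl_cons]
    have hkey : PySem.List.pyGetD (xs0 ++ [k]) ((xs0.length : Int)) "" = k := by
      rw [PySem.List.pyGetD_natCast]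
      exact getD_append_length xs0 k ""
    by_cases hsw : PySem.Chars.startswith p.1.toList k.toList = true
    · have ha : aStep (xs0 ++ [k], ts0, xs0.length, t) p.1 p.2
          = (xs0 ++ [k], ts0, xs0.length, t + p.2) := by
        simp [aStep, hkey, PySem.Str.startswith, hsw]
      rw [ha, ih xs0 ts0 k (t + p.2)]
      have hb : bCont k t (p :: l) = bCont k (t + p.2) l := by
        simp only [bCont, splitRun, PySem.Str.startswith, hsw, if_pos, sumRun_cons, add_assoc]
      rw [hb]
    · have ha : aStep (xs0 ++ [k], ts0, xs0.length, t) p.1 p.2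
          = (xs0 ++ [k] ++ [PySem.Str.slice p.1 (some 0) (some 7)],
             ts0 ++ [t], xs0.length + 1, p.2) := by
        simp [aStep, hkey, PySem.Str.startswith, hsw]
      have hlen : (xs0 ++ [k]).length = xs0.length + 1 := by simp
      rw [ha]
      have := ih (xs0 ++ [k]) (ts0 ++ [t]) (PySem.Str.slice p.1 (some 0) (some 7)) p.2
      rw [hlen] at this
      rw [this]
      have hb : bCont k t (p :: l)
          = (k :: (bCont (PySem.Str.slice p.1 (some 0) (some 7)) p.2 l).1,
             t :: (bCont (PySem.Str.slice p.1 (some 0) (some 7)) p.2 l).2) := by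
        obtain ⟨d, v⟩ := p
        simp only [bCont, splitRun, PySem.Str.startswith, hsw, Bool.false_eq_true, if_false, sumRun]
        rw [bLoop_cons, bCont]
        simp [sumRun]
      rw [hb]
      simp

-- ===== VERDICT (by name: the statement is the Claim_ definition above) =====
theorem datos_casos_spec : Claim_equal_datos_casos := by
  intro x y _ hpre
  obtain ⟨hne, hlen⟩ := hpre
  cases x with
  | nil => exact absurd rfl hne
  | cons d0 xr =>
    cases y with
    | nil => simp at hlen
    | cons v0 yr =>
      unfold Spec_datos_casos
      have key : datos_casos (d0 :: xr) (v0 :: yr)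
          = (let st := ((d0 :: xr).zip (v0 :: yr)).foldl (fun s p => aStep s p.1 p.2)
                ([PySem.Str.slice (PySem.List.pyGetD (d0 :: xr) 0 "") (some 0) (some 7)],
                 ([] : List Int), 0, 0)
             (st.1, st.2.1 ++ [st.2.2.2])) := by
        show (let st := (List.range (d0 :: xr).length).foldl
                (fun s (i : Nat) => aStep s (PySem.List.pyGetD (d0 :: xr) ((i : Nat) : Int) "")
                  (PySem.List.pyGetD (v0 :: yr) ((i : Nat) : Int) 0))
                ([PySem.Str.slice (PySem.List.pyGetD (d0 :: xr) 0 "") (some 0) (some 7)],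
                 ([] : List Int), 0, 0)
              (st.1, st.2.1 ++ [st.2.2.2])) = _
        rw [foldl_range_pyGetD_eq_zip aStep (d0 :: xr) (v0 :: yr) hlen]
      rw [key]
      have h0 : PySem.List.pyGetD (d0 :: xr) 0 "" = d0 := by
        simp [PySem.List.pyGetD_zero]
      rw [h0]
      simp only [List.zip_cons_cons, List.foldl_cons]
      have ha : aStep ([PySem.Str.slice d0 (some 0) (some 7)], ([] : List Int), 0, 0) d0 v0
          = ([PySem.Str.slice d0 (some 0) (some 7)], ([] : List Int), 0, 0 + v0) := by
        simp [aStep, PySem.List.pyGetD_zero, PySem.Str.startswith, PySem.Str.slice,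
          startswith_slice7]
      rw [ha]
      have := inv_lemma (xr.zip yr) [] [] (PySem.Str.slice d0 (some 0) (some 7)) (0 + v0)
      simp only [List.length_nil, List.nil_append] at this
      rw [this]
      unfold datos_casos_alt
      rw [List.zip_cons_cons, bLoop_cons]
      simp
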